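-- pv_equiv track=rewrite | github.com/pypi-data/pypi-mirror-365 | packages/gliner2/gliner2-1.0.1.tar.gz/gliner2-1.0.1/gliner2/inference/engine.py | _find_choice_indices
-- ===== SOURCE A (Python) =====
-- from typing import Any, Dict, List, Optional, Literal, Union, Tuple
--
-- def _find_choice_indices(choice: str, tokens: List[str]) -> List[int]:
--     """Find all starting indices where a choice appears in tokens."""
--     indices = []
--
--     # For classification choices, they often appear as single tokens in the prefix
--     # First check for exact match
--     choice_lower = choice.lower()
--     for i, token in enumerate(tokens):
--         if token.lower() == choice_lower:
--             indices.append(i)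
--
--     # If no exact match found, try substring matching for the prefix area
--     # This helps when choices are part of constructed tokens like "[selection]Italian"
--     if not indices:
--         for i, token in enumerate(tokens):
--             if choice_lower in token.lower():
--                 indices.append(i)
--
--     return indices
-- ===== SOURCE B (Python) =====
-- from typing import List
--
-- def _find_choice_indices(choice: str, tokens: List[str]) -> List[int]:
--     """One pass: collect exact and substring matches together; prefer exact."""
--     choice_lower = choice.lower()
--     exact: List[int] = []
--     substring: List[int] = []
--     for i, token in enumerate(tokens):
--         token_lower = token.lower()
--         if token_lower == choice_lower:
--             exact.append(i)
--         if choice_lower in token_lower: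
--             substring.append(i)
--     return exact if exact else substring
-- ===== Notes on version B (the rewrite author's own statement) =====
-- stated objective: simpler
-- what changed: Replaced the two sequential conditional scans (exact pass, then a fallback substring pass) by a single pass that maintains two accumulators and selects exact-else-substring afterwards; each token is lowered once instead of up to twice.
import Mathlib
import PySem

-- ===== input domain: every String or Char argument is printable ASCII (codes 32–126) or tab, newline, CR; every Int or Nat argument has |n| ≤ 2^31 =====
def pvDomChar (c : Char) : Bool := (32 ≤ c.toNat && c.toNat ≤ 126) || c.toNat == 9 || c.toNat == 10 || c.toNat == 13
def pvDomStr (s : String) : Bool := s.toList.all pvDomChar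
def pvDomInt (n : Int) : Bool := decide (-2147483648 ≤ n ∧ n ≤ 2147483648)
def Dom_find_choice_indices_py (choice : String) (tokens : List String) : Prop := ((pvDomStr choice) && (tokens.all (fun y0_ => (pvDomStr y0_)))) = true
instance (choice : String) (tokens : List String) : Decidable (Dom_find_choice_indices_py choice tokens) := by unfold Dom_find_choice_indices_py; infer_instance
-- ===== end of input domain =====

-- B replaces A's two sequential conditional scans by ONE pass keeping two accumulators
-- (exact matches and substring matches), selecting exact-else-substring at the end.

-- ===== PORT A =====
def find_choice_indices_py (choice : String) (tokens : List String) : List Int :=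
  let choice_lower := PySem.Str.lower choice
  let indices : List Int :=
    (PySem.List.enumerate tokens).foldl
      (fun acc it => if PySem.Str.lower it.2 == choice_lower then acc ++ [it.1] else acc) []
  if indices = [] then
    (PySem.List.enumerate tokens).foldl
      (fun acc it => if PySem.Str.isIn choice_lower (PySem.Str.lower it.2) then acc ++ [it.1] else acc) []
  else indices

-- ===== PORT B =====
def find_choice_indices_py_alt (choice : String) (tokens : List String) : List Int :=
  let choice_lower := PySem.Str.lower choice
  let p : List Int × List Int :=
    (PySem.List.enumerate tokens).foldl
      (fun p it =>
        let token_lower := PySem.Str.lower it.2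
        ((if token_lower == choice_lower then p.1 ++ [it.1] else p.1),
         (if PySem.Str.isIn choice_lower token_lower then p.2 ++ [it.1] else p.2)))
      ([], [])
  if p.1 ≠ [] then p.1 else p.2

-- ===== PRECONDITION & SPEC =====
def Spec_find_choice_indices_py (choice : String) (tokens : List String) (out : List Int) : Prop := out = find_choice_indices_py_alt choice tokens
instance (choice : String) (tokens : List String) (out : List Int) : Decidable (Spec_find_choice_indices_py choice tokens out) := by unfold Spec_find_choice_indices_py; infer_instance

-- ===== CLAIM (what is proved, stated in full; the proofs are below) =====
def Claim_equal_find_choice_indices_py : Prop := ∀ (choice : String) (tokens : List String), Dom_find_choice_indices_py choice tokens → Spec_find_choice_indices_py choice tokens (find_choice_indices_py choice tokens)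

-- ===== LEMMAS AND PROOFS =====

-- the fused fold over a pair equals the pair of the two independent folds
theorem pv_fold_pair {α : Type} (f g : List Int → α → List Int)
    (l : List α) (a b : List Int) :
    l.foldl (fun p it => (f p.1 it, g p.2 it)) (a, b)
      = (l.foldl f a, l.foldl g b) := by
  induction l generalizing a b with
  | nil => rfl
  | cons x xs ih => simp [List.foldl, ih]

-- ===== VERDICT (by name: the statement is the Claim_ definition above) =====
theorem find_choice_indices_py_spec : Claim_equal_find_choice_indices_py := by
  intro choice tokens _
  unfold Spec_find_choice_indices_py find_choice_indices_py find_choice_indices_py_alt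
  simp only [pv_fold_pair
    (fun acc it => if PySem.Str.lower it.2 == PySem.Str.lower choice then acc ++ [it.1] else acc)
    (fun acc it => if PySem.Str.isIn (PySem.Str.lower choice) (PySem.Str.lower it.2) then acc ++ [it.1] else acc)
    (PySem.List.enumerate tokens) [] []]
  by_cases h : (PySem.List.enumerate tokens).foldl
      (fun acc it => if PySem.Str.lower it.2 == PySem.Str.lower choice then acc ++ [it.1] else acc) [] = [] <;>
    simp [h]
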